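-- pv_equiv track=rewrite | github.com/jeffplays2005/courses | Computer Science 130/lab 13 - Recursion/q5.py | get_all_vowels
-- ===== SOURCE A (Python) =====
-- def get_all_vowels(list):
--     if len(list) == 0:
--         return []
--     else:
--         if (get_vowels := (lambda word: "" if len(word) == 0 else (word[0] + get_vowels(word[1:])) if word[0] in "aeiou" else get_vowels(word[1:])))(list[0]):
--             return [get_vowels(list[0])] + get_all_vowels(list[1:])
--         else:
--             return get_all_vowels(list[1:])
-- ===== SOURCE B (Python) =====
-- def get_all_vowels(list):
--     result = []
--     for word in list:
--         vowels = "".join(c for c in word if c in "aeiou")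
--         if vowels:
--             result.append(vowels)
--     return result
-- ===== Notes on version B (the rewrite author's own statement) =====
-- stated objective: simpler
-- what changed: Replaces the tail recursion over the list and the inner char-by-char recursive lambda (both with O(n) slice copies per step) with a single explicit loop accumulating filtered vowel strings.
import Mathlib
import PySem

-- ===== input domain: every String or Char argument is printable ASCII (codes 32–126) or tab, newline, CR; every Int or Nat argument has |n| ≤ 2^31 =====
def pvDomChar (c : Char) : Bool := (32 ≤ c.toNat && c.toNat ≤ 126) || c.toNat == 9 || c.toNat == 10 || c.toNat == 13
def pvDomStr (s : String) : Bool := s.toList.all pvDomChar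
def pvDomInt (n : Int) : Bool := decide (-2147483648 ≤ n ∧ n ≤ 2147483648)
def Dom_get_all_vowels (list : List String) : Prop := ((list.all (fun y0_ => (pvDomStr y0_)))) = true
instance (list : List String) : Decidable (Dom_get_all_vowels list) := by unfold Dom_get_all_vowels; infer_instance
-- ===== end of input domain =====

-- B replaces A's double recursion (over the list, and char-by-char inside each word) with one explicit loop that filters each word; same values, objective: simpler.

-- ===== PORT A =====
-- inner lambda get_vowels: char-by-char recursion over the word
def pvGetVowelsA : List Char → List Char
  | [] => []
  | c :: rest => if ("aeiou".toList.contains c) then c :: pvGetVowelsA rest else pvGetVowelsA rest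

def get_all_vowels : List String → List String
  | [] => []
  | w :: rest =>
      if pvGetVowelsA w.toList ≠ [] then
        String.mk (pvGetVowelsA w.toList) :: get_all_vowels rest
      else
        get_all_vowels rest

-- ===== PORT B =====
def get_all_vowels_alt (list : List String) : List String :=
  list.foldl
    (fun result word =>
      let vowels := word.toList.filter (fun c => "aeiou".toList.contains c)
      if vowels ≠ [] then result ++ [String.mk vowels] else result)
    []

-- ===== PRECONDITION & SPEC =====
def Spec_get_all_vowels (list : List String) (out : List String) : Prop := out = get_all_vowels_alt list
instance (list : List String) (out : List String) : Decidable (Spec_get_all_vowels list out) := by unfold Spec_get_all_vowels; infer_instance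

-- ===== CLAIM (what is proved, stated in full; the proofs are below) =====
def Claim_equal_get_all_vowels : Prop := ∀ (list : List String), Dom_get_all_vowels list → Spec_get_all_vowels list (get_all_vowels list)

-- ===== LEMMAS AND PROOFS =====
theorem pvGetVowelsA_eq_filter (cs : List Char) :
    pvGetVowelsA cs = cs.filter (fun c => "aeiou".toList.contains c) := by
  induction cs with
  | nil => rfl
  | cons c rest ih =>
      by_cases h : ("aeiou".toList.contains c) = true <;>
        simp [pvGetVowelsA, List.filter_cons, h, ih]

theorem foldl_acc (l : List String) (acc : List String) :
    l.foldl
      (fun result word =>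
        let vowels := word.toList.filter (fun c => "aeiou".toList.contains c)
        if vowels ≠ [] then result ++ [String.mk vowels] else result)
      acc = acc ++ get_all_vowels l := by
  induction l generalizing acc with
  | nil => simp [get_all_vowels]
  | cons w rest ih =>
      simp only [List.foldl_cons]
      rw [ih]
      conv_rhs => rw [get_all_vowels, pvGetVowelsA_eq_filter]
      by_cases h : w.toList.filter (fun c => "aeiou".toList.contains c) ≠ [] <;>
        · first
          | (rw [if_pos h, if_pos h]; simp)
          | (rw [if_neg h, if_neg h])

-- ===== VERDICT (by name: the statement is the Claim_ definition above) =====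
theorem get_all_vowels_spec : Claim_equal_get_all_vowels := by
  intro list _
  unfold Spec_get_all_vowels get_all_vowels_alt
  rw [foldl_acc]
  simp
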